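-- pv_equiv track=rewrite | github.com/guiOchagas/ESTUDOS | PYTHON/PYTHON_ORG_BRASIL/STRINGS/ex009*****.py | verificar_cpf
-- ===== SOURCE A (Python) =====
-- def verificar_cpf(cpf):
--     """Verifica se o CPF está no formato xxx.xxx.xxx-xx."""
--     # Verifica o comprimento e se contém caracteres corretos
--     if len(cpf) != 14:
--         return False
--
--     # Verifica cada parte do formato
--     if not (cpf[3] == '.' and cpf[7] == '.' and cpf[11] == '-'):
--         return False
--
--     # Verifica se todos os outros caracteres são dígitos
--     for i in range(14):
--         if i in [3, 7, 11]:  # Ignora os caracteres de formatação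
--             continue
--         if not cpf[i].isdigit():
--             return False
--
--     return True
-- ===== SOURCE B (Python) =====
-- def verificar_cpf(cpf):
--     """Verifica se o CPF está no formato xxx.xxx.xxx-xx."""
--     if len(cpf) != 14:
--         return False
--     if not (cpf[3] == '.' and cpf[7] == '.' and cpf[11] == '-'):
--         return False
--     # validate the four digit blocks as slices instead of an index loop
--     return cpf[:3].isdigit() and cpf[4:7].isdigit() and cpf[8:11].isdigit() and cpf[12:].isdigit()
-- ===== Notes on version B (the rewrite author's own statement) =====
-- stated objective: simpler
-- what changed: Replaces the per-index loop over range(14) with skip-list membership tests by isdigit checks on the four fixed digit slices of the string.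
import Mathlib
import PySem

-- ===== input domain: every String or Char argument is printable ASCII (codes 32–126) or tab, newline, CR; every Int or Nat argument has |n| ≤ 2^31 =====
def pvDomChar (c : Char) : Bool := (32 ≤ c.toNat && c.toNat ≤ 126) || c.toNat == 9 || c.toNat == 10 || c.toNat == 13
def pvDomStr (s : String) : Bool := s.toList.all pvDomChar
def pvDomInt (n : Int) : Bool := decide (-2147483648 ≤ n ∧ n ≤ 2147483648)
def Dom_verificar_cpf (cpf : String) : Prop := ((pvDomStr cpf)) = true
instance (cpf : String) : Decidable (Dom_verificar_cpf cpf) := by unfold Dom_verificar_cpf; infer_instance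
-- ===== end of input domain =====

-- B validates the four fixed digit blocks as slices instead of looping over all 14 indices; objective: simpler.

-- ===== PORT A =====
def verificar_cpf (cpf : String) : Bool :=
  if PySem.Str.len cpf ≠ 14 then false
  else if ¬ (PySem.List.pyGetD cpf.toList 3 ' ' = '.' ∧
             PySem.List.pyGetD cpf.toList 7 ' ' = '.' ∧
             PySem.List.pyGetD cpf.toList 11 ' ' = '-') then false
  else
    (PySem.List.pyRange 0 14 1).all (fun i =>
      if i ∈ ([3, 7, 11] : List Int) then true
      else PySem.Chars.isdigit (PySem.List.pyGetD cpf.toList i ' '))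

-- ===== PORT B =====
def verificar_cpf_alt (cpf : String) : Bool :=
  if PySem.Str.len cpf ≠ 14 then false
  else if ¬ (PySem.List.pyGetD cpf.toList 3 ' ' = '.' ∧
             PySem.List.pyGetD cpf.toList 7 ' ' = '.' ∧
             PySem.List.pyGetD cpf.toList 11 ' ' = '-') then false
  else
    PySem.Chars.strIsdigit (PySem.List.slice cpf.toList none (some 3)) &&
    PySem.Chars.strIsdigit (PySem.List.slice cpf.toList (some 4) (some 7)) &&
    PySem.Chars.strIsdigit (PySem.List.slice cpf.toList (some 8) (some 11)) &&
    PySem.Chars.strIsdigit (PySem.List.slice cpf.toList (some 12) none)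

-- ===== PRECONDITION & SPEC =====
def Spec_verificar_cpf (cpf : String) (out : Bool) : Prop := out = verificar_cpf_alt cpf
instance (cpf : String) (out : Bool) : Decidable (Spec_verificar_cpf cpf out) := by unfold Spec_verificar_cpf; infer_instance

-- ===== CLAIM (what is proved, stated in full; the proofs are below) =====
def Claim_equal_verificar_cpf : Prop := ∀ (cpf : String), Dom_verificar_cpf cpf → Spec_verificar_cpf cpf (verificar_cpf cpf)

-- ===== LEMMAS AND PROOFS =====

theorem pv_len14 {α : Type} (l : List α) (h : l.length = 14) :
    ∃ a b c d e f g h' i j k m n o, l = [a, b, c, d, e, f, g, h', i, j, k, m, n, o] := by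
  match l, h with
  | [a, b, c, d, e, f, g, h', i, j, k, m, n, o], _ =>
    exact ⟨a, b, c, d, e, f, g, h', i, j, k, m, n, o, rfl⟩

-- ===== VERDICT (by name: the statement is the Claim_ definition above) =====
theorem verificar_cpf_spec : Claim_equal_verificar_cpf := by
  intro cpf _
  unfold Spec_verificar_cpf verificar_cpf verificar_cpf_alt
  have hL : cpf.toList.length = cpf.length := by simp
  by_cases h : cpf.toList.length = 14
  · obtain ⟨a, b, c, d, e, f, g, h', i, j, k, m, n, o, hl⟩ := pv_len14 _ h
    simp [PySem.Str.len_eq, hl, PySem.List.pyGetD, PySem.List.pyIdx?, PySem.List.pyGet?,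
      PySem.List.slice, PySem.List.clampIdx, PySem.Chars.strIsdigit, PySem.List.pyRange,
      List.range_succ, Bool.and_assoc, Bool.and_comm, Bool.and_left_comm]
  · have h14 : (cpf.length : Int) ≠ 14 := by rw [← hL]; exact_mod_cast h
    simp [PySem.Str.len_eq, h14]
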